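-- pv_equiv track=rewrite | github.com/KevDog/niagarascheduler | utilities/course_scraper.py | organize_courses_by_department
-- ===== SOURCE A (Python) =====
-- def organize_courses_by_department(courses):
--     """Organize courses by department prefix (legacy method)"""
--     organized = {}
--
--     for course in courses:
--         # Extract department prefix from course number (e.g., THR from THR101A1)
--         course_number = course['number']
--         department = ''.join([c for c in course_number if c.isalpha()])[:3]
--
--         if department not in organized:
--             organized[department] = []
--
--         organized[department].append(course)
--
--     return organized
-- ===== SOURCE B (Python) =====
-- def organize_courses_by_department(courses):
--     """Organize courses by department prefix (two-phase: distinct keys, then one filter per key)"""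
--     def dept(course):
--         return ''.join([c for c in course['number'] if c.isalpha()])[:3]
--
--     keys = []
--     for course in courses:
--         k = dept(course)
--         if k not in keys:
--             keys.append(k)
--
--     return {k: [c for c in courses if dept(c) == k] for k in keys}
-- ===== Notes on version B (the rewrite author's own statement) =====
-- stated objective: alternative
-- what changed: B replaces A's single-pass dict-accumulation (conditional insert then append) with a two-phase decomposition: first collect the distinct department keys in order of first occurrence, then build the dict by filtering the full course list once per key.
import Mathlib
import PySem

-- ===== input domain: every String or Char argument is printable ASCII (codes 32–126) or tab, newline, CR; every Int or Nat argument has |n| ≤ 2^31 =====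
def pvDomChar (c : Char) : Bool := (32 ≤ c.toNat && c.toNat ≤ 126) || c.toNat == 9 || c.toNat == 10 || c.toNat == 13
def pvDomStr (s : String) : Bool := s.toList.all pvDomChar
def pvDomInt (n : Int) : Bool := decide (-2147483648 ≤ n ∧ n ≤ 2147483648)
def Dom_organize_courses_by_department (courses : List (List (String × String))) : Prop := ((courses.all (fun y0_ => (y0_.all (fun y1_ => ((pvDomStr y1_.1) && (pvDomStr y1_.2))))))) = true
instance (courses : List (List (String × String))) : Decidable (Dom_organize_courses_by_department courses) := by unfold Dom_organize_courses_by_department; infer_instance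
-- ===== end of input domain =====

-- B replaces A's single-pass dict accumulation by a two-phase build (distinct keys in first-occurrence
-- order, then one filter over the courses per key); same return value, not faster.

-- shared key extraction (identical in both Pythons):
-- ''.join([c for c in course['number'] if c.isalpha()])[:3]; the [:3] slice on a string is `take 3`
-- (PySem.List.slice_to_natCast); under Pre_ the key 'number' is present, so getD "" is exact.
def pvDept (course : List (String × String)) : String :=
  let number := (PySem.Dict.mk course).getD "number" ""
  String.ofList ((number.toList.filter PySem.Chars.isalpha).take 3)

-- ===== PORT A =====
def organize_courses_by_department (courses : List (List (String × String))) : List (String × List (List (String × String))) :=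
  (courses.foldl
    (fun organized course =>
      let department := pvDept course
      let organized := if organized.contains department then organized
                       else organized.insert department []
      organized.modify department [] (fun l => l ++ [course]))
    (PySem.Dict.empty : PySem.Dict String (List (List (String × String))))).items

-- ===== PORT B =====
def organize_courses_by_department_alt (courses : List (List (String × String))) : List (String × List (List (String × String))) :=
  let keys := courses.foldl
    (fun ks course => let k := pvDept course; if k ∈ ks then ks else ks ++ [k]) []
  keys.map (fun k => (k, courses.filter (fun c => pvDept c == k)))

-- ===== PRECONDITION & SPEC =====
-- Pre_ excludes exactly the inputs where some course dict lacks the key 'number':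
-- there the Python A raises KeyError (and so does B).
def Pre_organize_courses_by_department (courses : List (List (String × String))) : Prop :=
  ∀ c ∈ courses, "number" ∈ c.map Prod.fst
instance (courses : List (List (String × String))) : Decidable (Pre_organize_courses_by_department courses) := by unfold Pre_organize_courses_by_department; infer_instance
def pvWitness_organize_courses_by_department : (List (List (String × String))) :=
  [[("number", "THR101A1")], [("number", "eng200"), ("title", "x")], [("number", "")]]

def Spec_organize_courses_by_department (courses : List (List (String × String))) (out : List (String × List (List (String × String)))) : Prop := out = organize_courses_by_department_alt courses
instance (courses : List (List (String × String))) (out : List (String × List (List (String × String)))) : Decidable (Spec_organize_courses_by_department courses out) := by unfold Spec_organize_courses_by_department; infer_instance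

-- ===== CLAIM (what is proved, stated in full; the proofs are below) =====
def Claim_equal_organize_courses_by_department : Prop := ∀ (courses : List (List (String × String))), Dom_organize_courses_by_department courses → Pre_organize_courses_by_department courses → Spec_organize_courses_by_department courses (organize_courses_by_department courses)

-- ===== LEMMAS AND PROOFS =====

-- A's loop body: the conditional insert of [] followed by the append is exactly one `modify`.
theorem pvStepA_eq_modify (d : PySem.Dict String (List (List (String × String))))
    (course : List (String × String)) :
    (let department := pvDept course
     let d' := if d.contains department then d else d.insert department []
     d'.modify department [] (fun l => l ++ [course]))
    = d.modify (pvDept course) [] (fun l => l ++ [course]) := by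
  by_cases h : d.contains (pvDept course) = true
  · simp [h]
  · simp only [Bool.not_eq_true] at h
    simp only [h, Bool.false_eq_true, if_false]
    unfold PySem.Dict.modify
    rw [PySem.Dict.getD_insert_self, PySem.Dict.insert_insert_self,
        PySem.Dict.getD_of_not_contains d ([] : List (List (String × String))) h]

theorem pvFoldA_eq (courses : List (List (String × String)))
    (d : PySem.Dict String (List (List (String × String)))) :
    courses.foldl
      (fun organized course =>
        let department := pvDept course
        let organized := if organized.contains department then organized
                         else organized.insert department []
        organized.modify department [] (fun l => l ++ [course])) d
    = (courses.map (fun c => (pvDept c, c))).foldl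
        (fun d p => d.modify p.1 [] (fun l => l ++ [p.2])) d := by
  induction courses generalizing d with
  | nil => rfl
  | cons c rest ih => simpa [pvStepA_eq_modify] using ih _

theorem pvKeysB_eq (courses : List (List (String × String))) :
    courses.foldl (fun ks course => let k := pvDept course; if k ∈ ks then ks else ks ++ [k]) []
    = PySem.Set.update [] (courses.map pvDept) := by
  rw [PySem.Set.update_map_eq_foldl_add]
  refine PySem.List.foldl_congr_mem _ _ _ _ (fun s c _ => ?_)
  simp [PySem.Set.add, PySem.Set.contains]

-- ===== VERDICT (by name: the statement is the Claim_ definition above) =====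
theorem organize_courses_by_department_spec : Claim_equal_organize_courses_by_department := by
  intro courses _ _
  show organize_courses_by_department courses = organize_courses_by_department_alt courses
  unfold organize_courses_by_department organize_courses_by_department_alt
  rw [pvFoldA_eq, pvKeysB_eq]
  have hnd : ((courses.map (fun c => (pvDept c, c))).foldl
      (fun d p => d.modify p.1 [] (fun l => l ++ [p.2]))
      (PySem.Dict.empty : PySem.Dict String (List (List (String × String))))).keys.Nodup :=
    PySem.Dict.nodup_keys_foldl_modify_key (courses.map (fun c => (pvDept c, c)))
      (fun (p : String × List (String × String)) => p.1)
      ([] : List (List (String × String)))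
      (fun _ (p : String × List (String × String)) v => v ++ [p.2]) _
      (by simp [PySem.Dict.keys_empty])
  rw [PySem.Dict.items_eq_map_keys _ hnd ([] : List (List (String × String)))]
  rw [PySem.Dict.keys_foldl_modify_key (courses.map (fun c => (pvDept c, c)))
      (fun (p : String × List (String × String)) => p.1)
      ([] : List (List (String × String)))
      (fun _ (p : String × List (String × String)) v => v ++ [p.2])]
  simp only [PySem.Dict.keys_empty, List.map_map]
  have hkeys : (courses.map ((fun (p : String × List (String × String)) => p.1) ∘ (fun c => (pvDept c, c))))
      = courses.map pvDept := by simp [Function.comp]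
  rw [hkeys]
  refine List.map_congr_left (fun k _ => ?_)
  have hg := PySem.Dict.getD_foldl_modify_append
    (courses.map (fun c => (pvDept c, c)))
    (PySem.Dict.empty : PySem.Dict String (List (List (String × String)))) k
  simp only [PySem.Dict.getD_empty, List.nil_append] at hg
  rw [hg]
  simp [List.filter_map, List.map_map, Function.comp_def]
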